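-- pv_equiv track=rewrite | github.com/lshhuihui/Algorithm_Alchemist | LanQiao/TestTwo2025-11-16.py | get_all_subsequences
-- ===== SOURCE A (Python) =====
-- def get_all_subsequences(arr):
--     """递归获取所有子序列"""
--     if len(arr) == 0:
--         return [[]]  # 基本情况：空列表只有空子序列
--     # 递归获取除了第一个元素外的所有子序列
--     rest_subsequences = get_all_subsequences(arr[1:])  # 从1到尾
--
--     # 对于rest_subsequences中的每个子序列，有两种选择：
--     # 1. 不包含第一个元素（保持原样）
--     # 2. 包含第一个元素（在子序列前添加第一个元素）
--     result = []
--     for subseq in rest_subsequences: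
--         # 不包含第一个元素
--         result.append(subseq)
--         # 包含第一个元素
--         result.append([arr[0]] + subseq)
--
--     return result
-- ===== SOURCE B (Python) =====
-- def get_all_subsequences(arr):
--     """Iterative: fold over arr in reverse, doubling the result list."""
--     result = [[]]
--     for x in reversed(arr):
--         result = [s for sub in result for s in (sub, [x] + sub)]
--     return result
-- ===== Notes on version B (the rewrite author's own statement) =====
-- stated objective: alternative
-- what changed: Replaced the recursion on the list head (recursive call on arr[1:] then an append loop) by an iterative fold: start from the singleton list holding the empty subsequence and, for each element of arr in reverse, rebuild the result with a flat comprehension emitting each subsequence and then the element prepended to it.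
import Mathlib
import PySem

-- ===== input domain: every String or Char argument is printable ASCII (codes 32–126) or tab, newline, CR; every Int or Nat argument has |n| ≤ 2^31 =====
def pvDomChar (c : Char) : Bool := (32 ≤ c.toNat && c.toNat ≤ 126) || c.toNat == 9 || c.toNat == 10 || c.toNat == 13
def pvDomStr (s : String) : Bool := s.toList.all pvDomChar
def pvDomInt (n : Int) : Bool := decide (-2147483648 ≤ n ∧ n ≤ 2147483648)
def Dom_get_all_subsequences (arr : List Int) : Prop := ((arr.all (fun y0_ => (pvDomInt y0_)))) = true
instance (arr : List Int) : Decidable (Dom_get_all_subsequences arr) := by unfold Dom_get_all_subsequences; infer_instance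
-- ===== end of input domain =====

-- ===== PORT A =====
-- recursion on the head; the result loop is a foldl over the recursive result
def get_all_subsequences : List Int → List (List Int)
  | [] => [[]]
  | x :: rest =>
    (get_all_subsequences rest).foldl (fun result subseq => result ++ [subseq, x :: subseq]) []

-- ===== PORT B =====
-- iterative: fold over arr reversed, doubling via a flat comprehension (flatMap)
def get_all_subsequences_alt (arr : List Int) : List (List Int) :=
  arr.reverse.foldl (fun result x => result.flatMap (fun sub => [sub, x :: sub])) [[]]

-- ===== PRECONDITION & SPEC =====
def Spec_get_all_subsequences (arr : List Int) (out : List (List Int)) : Prop := out = get_all_subsequences_alt arr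
instance (arr : List Int) (out : List (List Int)) : Decidable (Spec_get_all_subsequences arr out) := by unfold Spec_get_all_subsequences; infer_instance

-- ===== CLAIM (what is proved, stated in full; the proofs are below) =====
def Claim_equal_get_all_subsequences : Prop := ∀ (arr : List Int), Dom_get_all_subsequences arr → Spec_get_all_subsequences arr (get_all_subsequences arr)

-- ===== LEMMAS AND PROOFS =====

-- ===== VERDICT (by name: the statement is the Claim_ definition above) =====
lemma alt_cons (x : Int) (rest : List Int) :
    get_all_subsequences_alt (x :: rest) =
      (get_all_subsequences_alt rest).flatMap (fun sub => [sub, x :: sub]) := by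
  simp [get_all_subsequences_alt]

lemma ab_eq (arr : List Int) : get_all_subsequences arr = get_all_subsequences_alt arr := by
  induction arr with
  | nil => simp [get_all_subsequences, get_all_subsequences_alt]
  | cons x rest ih =>
    rw [alt_cons, ← ih, get_all_subsequences,
      PySem.List.foldl_append_eq_flatMap, List.nil_append]

theorem get_all_subsequences_spec : Claim_equal_get_all_subsequences := by
  intro arr _
  unfold Spec_get_all_subsequences
  exact ab_eq arr
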